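-- pv_equiv track=rewrite | github.com/lllwwwbbb/2020-nju-sme | FL-project/analysis/ranklist.py | get_spectrum_info
-- ===== SOURCE A (Python) =====
-- def get_spectrum_info(coverage_matrix, original_test_report, statements, tests):
--     pass_map = dict([(s, 0) for s in statements])
--     fail_map = dict([(s, 0) for s in statements])
--     # collect spectrum information from gzoltar result files
--     pass_set, fail_set = set(), set()
--     for i, (test_case, is_passed) in enumerate(tests):
--         if is_passed:
--             pass_set.add(i)
--         else:
--             fail_set.add(i)
--     total_passed, total_failed = len(pass_set), len(fail_set)
--     for i in pass_set:
--         for s, covered in zip(statements, coverage_matrix[i]):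
--             pass_map[s] += covered
--     for i in fail_set:
--         for s, covered in zip(statements, coverage_matrix[i]):
--             fail_map[s] += covered
--     return fail_map, pass_map, total_failed, total_passed
-- ===== SOURCE B (Python) =====
-- def get_spectrum_info(coverage_matrix, original_test_report, statements, tests):
--     pass_map = {s: 0 for s in statements}
--     fail_map = {s: 0 for s in statements}
--     total_passed = total_failed = 0
--     for i, (test_case, is_passed) in enumerate(tests):
--         if is_passed:
--             total_passed += 1
--             target = pass_map
--         else:
--             total_failed += 1
--             target = fail_map
--         for s, covered in zip(statements, coverage_matrix[i]):
--             target[s] += covered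
--     return fail_map, pass_map, total_failed, total_passed
-- ===== Notes on version B (the rewrite author's own statement) =====
-- stated objective: simpler
-- what changed: B drops the pass_set/fail_set index sets and A's two separate accumulation passes, doing everything in a single loop over enumerate(tests) that accumulates the chosen map and counter directly.
import Mathlib
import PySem

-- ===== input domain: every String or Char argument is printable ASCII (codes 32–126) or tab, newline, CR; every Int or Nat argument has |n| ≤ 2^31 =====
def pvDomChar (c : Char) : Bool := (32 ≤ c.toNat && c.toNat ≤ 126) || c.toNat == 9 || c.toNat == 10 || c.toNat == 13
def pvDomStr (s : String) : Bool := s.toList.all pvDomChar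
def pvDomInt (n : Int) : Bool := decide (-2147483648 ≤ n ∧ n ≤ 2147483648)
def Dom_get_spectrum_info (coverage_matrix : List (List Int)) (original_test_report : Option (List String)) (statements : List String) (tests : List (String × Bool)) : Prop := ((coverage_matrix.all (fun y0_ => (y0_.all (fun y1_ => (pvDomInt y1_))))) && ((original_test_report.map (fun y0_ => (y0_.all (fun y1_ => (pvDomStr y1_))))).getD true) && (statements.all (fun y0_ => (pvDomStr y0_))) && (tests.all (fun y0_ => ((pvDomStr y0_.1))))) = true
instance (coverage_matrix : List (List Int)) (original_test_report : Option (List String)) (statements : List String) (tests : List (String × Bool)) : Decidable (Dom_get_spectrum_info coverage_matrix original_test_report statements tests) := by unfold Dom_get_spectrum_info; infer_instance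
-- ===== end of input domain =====

-- B replaces A's partition-into-index-sets-then-two-passes structure with one pass over
-- enumerate(tests) that accumulates directly into pass_map/fail_map and two counters (objective: simpler).

-- shared accumulation of one coverage row: for s, covered in zip(statements, row): map[s] += covered
-- (Dict.modify with default 0 is exact here: every s comes from statements, with which both maps are initialized)
def pvAddRow (m : PySem.Dict String Int) (pairs : List (String × Int)) : PySem.Dict String Int :=
  pairs.foldl (fun m p => PySem.Dict.modify m p.1 0 (fun v => v + p.2)) m

-- ===== PORT A =====
def get_spectrum_info (coverage_matrix : List (List Int)) (original_test_report : Option (List String)) (statements : List String) (tests : List (String × Bool)) : (List (String × Int)) × (List (String × Int)) × Int × Int :=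
  let pass_map0 : PySem.Dict String Int := PySem.Dict.ofList (statements.map (fun s => (s, 0)))
  let fail_map0 : PySem.Dict String Int := PySem.Dict.ofList (statements.map (fun s => (s, 0)))
  let sets := (PySem.List.enumerate tests 0).foldl
    (fun (st : PySem.Set Int × PySem.Set Int) p =>
      if p.2.2 then (PySem.Set.add st.1 p.1, st.2) else (st.1, PySem.Set.add st.2 p.1))
    (PySem.Set.empty, PySem.Set.empty)
  let total_passed : Int := (PySem.Set.len sets.1 : Int)
  let total_failed : Int := (PySem.Set.len sets.2 : Int)
  -- iteration over pass_set/fail_set: insertion order (increasing indices); the accumulated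
  -- dict values are order-independent (addition), the dicts' key order is fixed at init
  let pass_map := sets.1.foldl
    (fun m i => pvAddRow m (statements.zip (PySem.List.pyGetD coverage_matrix i []))) pass_map0
  let fail_map := sets.2.foldl
    (fun m i => pvAddRow m (statements.zip (PySem.List.pyGetD coverage_matrix i []))) fail_map0
  (fail_map.items, pass_map.items, total_failed, total_passed)

-- ===== PORT B =====
def get_spectrum_info_alt (coverage_matrix : List (List Int)) (original_test_report : Option (List String)) (statements : List String) (tests : List (String × Bool)) : (List (String × Int)) × (List (String × Int)) × Int × Int :=
  let init : PySem.Dict String Int := PySem.Dict.ofList (statements.map (fun s => (s, 0)))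
  let st := (PySem.List.enumerate tests 0).foldl
    (fun (st : PySem.Dict String Int × PySem.Dict String Int × Int × Int) p =>
      if p.2.2 then
        (pvAddRow st.1 (statements.zip (PySem.List.pyGetD coverage_matrix p.1 [])), st.2.1, st.2.2.1 + 1, st.2.2.2)
      else
        (st.1, pvAddRow st.2.1 (statements.zip (PySem.List.pyGetD coverage_matrix p.1 [])), st.2.2.1, st.2.2.2 + 1))
    (init, init, 0, 0)
  (st.2.1.items, st.1.items, st.2.2.2, st.2.2.1)

-- ===== PRECONDITION & SPEC =====
-- Pre_ excludes exactly the inputs where coverage_matrix[i] raises IndexError in A (fewer rows than tests)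
def Pre_get_spectrum_info (coverage_matrix : List (List Int)) (original_test_report : Option (List String)) (statements : List String) (tests : List (String × Bool)) : Prop :=
  tests.length ≤ coverage_matrix.length
instance (coverage_matrix : List (List Int)) (original_test_report : Option (List String)) (statements : List String) (tests : List (String × Bool)) : Decidable (Pre_get_spectrum_info coverage_matrix original_test_report statements tests) := by unfold Pre_get_spectrum_info; infer_instance
def pvWitness_get_spectrum_info : List (List Int) × Option (List String) × List String × (List (String × Bool)) :=
  ([[1, 0], [0, 1]], none, ["s1", "s2"], [("t1", true), ("t2", false)])
def Spec_get_spectrum_info (coverage_matrix : List (List Int)) (original_test_report : Option (List String)) (statements : List String) (tests : List (String × Bool)) (out : (List (String × Int)) × (List (String × Int)) × Int × Int) : Prop := out = get_spectrum_info_alt coverage_matrix original_test_report statements tests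
instance (coverage_matrix : List (List Int)) (original_test_report : Option (List String)) (statements : List String) (tests : List (String × Bool)) (out : (List (String × Int)) × (List (String × Int)) × Int × Int) : Decidable (Spec_get_spectrum_info coverage_matrix original_test_report statements tests out) := by unfold Spec_get_spectrum_info; infer_instance

-- ===== CLAIM (what is proved, stated in full; the proofs are below) =====
def Claim_equal_get_spectrum_info : Prop := ∀ (coverage_matrix : List (List Int)) (original_test_report : Option (List String)) (statements : List String) (tests : List (String × Bool)), Dom_get_spectrum_info coverage_matrix original_test_report statements tests → Pre_get_spectrum_info coverage_matrix original_test_report statements tests → Spec_get_spectrum_info coverage_matrix original_test_report statements tests (get_spectrum_info coverage_matrix original_test_report statements tests)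

-- ===== LEMMAS AND PROOFS =====

-- A's partition loop: with pairwise-distinct indices not yet present, Set.add always appends,
-- so the two sets are the filtered index lists.
theorem pv_sets_fold (L : List (Int × (String × Bool))) (ps fs : PySem.Set Int)
    (hL : L.Pairwise (fun p q => p.1 ≠ q.1))
    (hps : ∀ q ∈ L, q.1 ∉ ps) (hfs : ∀ q ∈ L, q.1 ∉ fs) :
    L.foldl (fun (st : PySem.Set Int × PySem.Set Int) p =>
        if p.2.2 then (PySem.Set.add st.1 p.1, st.2) else (st.1, PySem.Set.add st.2 p.1)) (ps, fs)
      = (ps ++ (L.filter (fun p => p.2.2)).map (·.1),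
         fs ++ (L.filter (fun p => !p.2.2)).map (·.1)) := by
  induction L generalizing ps fs with
  | nil => simp
  | cons p L ih =>
    rcases List.pairwise_cons.mp hL with ⟨hp, hL'⟩
    by_cases hb : p.2.2
    · have hadd : PySem.Set.add ps p.1 = ps ++ [p.1] := by
        simp [PySem.Set.add, PySem.Set.contains, hps p (by simp)]
      rw [List.foldl_cons]
      simp only [hb, if_pos]
      rw [hadd, ih (ps ++ [p.1]) fs hL'
          (fun q hq => by
            simp only [List.mem_append, List.mem_singleton, not_or]
            exact ⟨hps q (by simp [hq]), Ne.symm (hp q hq)⟩)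
          (fun q hq => hfs q (by simp [hq]))]
      simp [hb]
    · have hadd : PySem.Set.add fs p.1 = fs ++ [p.1] := by
        simp [PySem.Set.add, PySem.Set.contains, hfs p (by simp)]
      rw [List.foldl_cons]
      simp only [hb, if_neg, Bool.false_eq_true, not_false_iff]
      rw [hadd, ih ps (fs ++ [p.1]) hL'
          (fun q hq => hps q (by simp [hq]))
          (fun q hq => by
            simp only [List.mem_append, List.mem_singleton, not_or]
            exact ⟨hfs q (by simp [hq]), Ne.symm (hp q hq)⟩)]
      simp [hb]

-- B's fused loop unzips into the two per-map folds over the filtered index lists plus counters.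
theorem pv_b_fold (g : PySem.Dict String Int → Int → PySem.Dict String Int)
    (L : List (Int × (String × Bool))) (pm fm : PySem.Dict String Int) (tp tf : Int) :
    L.foldl (fun (st : PySem.Dict String Int × PySem.Dict String Int × Int × Int) p =>
        if p.2.2 then (g st.1 p.1, st.2.1, st.2.2.1 + 1, st.2.2.2)
        else (st.1, g st.2.1 p.1, st.2.2.1, st.2.2.2 + 1)) (pm, fm, tp, tf)
      = (((L.filter (fun p => p.2.2)).map (·.1)).foldl g pm,
         ((L.filter (fun p => !p.2.2)).map (·.1)).foldl g fm,
         tp + ((L.filter (fun p => p.2.2)).length : Int),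
         tf + ((L.filter (fun p => !p.2.2)).length : Int)) := by
  induction L generalizing pm fm tp tf with
  | nil => simp
  | cons p L ih =>
    by_cases hb : p.2.2
    · rw [List.foldl_cons]
      simp only [hb, if_pos]
      rw [ih]
      simp [hb]
      omega
    · rw [List.foldl_cons]
      simp only [hb, if_neg, Bool.false_eq_true, not_false_iff]
      rw [ih]
      simp [hb]
      omega

-- ===== VERDICT (by name: the statement is the Claim_ definition above) =====
theorem get_spectrum_info_spec : Claim_equal_get_spectrum_info := by
  intro cm otr stmts tests _ _
  unfold Spec_get_spectrum_info
  simp only [get_spectrum_info, get_spectrum_info_alt]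
  rw [pv_sets_fold (PySem.List.enumerate tests 0) PySem.Set.empty PySem.Set.empty
        ((PySem.List.pairwise_lt_enumerate tests 0).imp (fun h => ne_of_lt h))
        (by simp [PySem.Set.empty]) (by simp [PySem.Set.empty]),
      pv_b_fold (fun m i => pvAddRow m (stmts.zip (PySem.List.pyGetD cm i [])))]
  simp [PySem.Set.len, PySem.Set.empty]
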